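-- pv_equiv track=rewrite | github.com/roscarraig/aoc2025 | day10.py | jcheck
-- ===== SOURCE A (Python) =====
-- def jcheck(target, jolt):
--     jpass = 1
--     for i in range(len(target)):
--         if jolt[i] > target[i]:
--             return 2
--         if jolt[i] != target[i]:
--             jpass = 0
--     return jpass
-- ===== SOURCE B (Python) =====
-- def jcheck(target, jolt):
--     if any(jolt[i] > target[i] for i in range(len(target))):
--         return 2
--     if all(jolt[i] == target[i] for i in range(len(target))):
--         return 1
--     return 0
-- ===== Notes on version B (the rewrite author's own statement) =====
-- stated objective: idiomatic
-- what changed: Replaced the single interleaved loop with its jpass flag by two staged passes: an any() scan for an exceeding element deciding 2, then an all() scan for elementwise equality deciding between 1 and 0.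
import Mathlib
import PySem

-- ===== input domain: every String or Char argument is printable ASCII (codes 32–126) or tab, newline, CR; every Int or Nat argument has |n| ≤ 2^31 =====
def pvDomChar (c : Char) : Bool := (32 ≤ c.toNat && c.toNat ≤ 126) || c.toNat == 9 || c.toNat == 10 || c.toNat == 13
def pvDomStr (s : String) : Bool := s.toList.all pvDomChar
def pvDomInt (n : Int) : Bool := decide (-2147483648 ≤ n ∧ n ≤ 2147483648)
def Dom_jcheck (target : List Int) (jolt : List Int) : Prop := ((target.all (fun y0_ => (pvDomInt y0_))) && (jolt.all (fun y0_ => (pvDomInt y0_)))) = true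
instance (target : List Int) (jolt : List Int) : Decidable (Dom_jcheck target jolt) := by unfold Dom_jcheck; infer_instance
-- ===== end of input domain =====

-- B replaces A's single interleaved loop with a jpass flag by two staged any/all passes (objective: idiomatic).
-- ===== PORT A =====
-- for i in range(len(target)): …  — counter loop; jolt[i] raises IndexError where jolt[i]? = none
def jcheckLoop (target jolt : List Int) (i : Nat) (jpass : Int) : Int :=
  if h : i < target.length then
    match jolt[i]? with
    | none => 0  -- Python raises IndexError here; excluded by Pre_jcheck
    | some j =>
      if j > target[i] then 2
      else if j ≠ target[i] then jcheckLoop target jolt (i + 1) 0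
      else jcheckLoop target jolt (i + 1) jpass
  else jpass
termination_by target.length - i

def jcheck (target : List Int) (jolt : List Int) : Int :=
  jcheckLoop target jolt 0 1

-- ===== PORT B =====
-- any(jolt[i] > target[i] for i in range(len(target))): short-circuit scan of the index list.
-- Indexing is ported with getD: exact on every Pre_ input (there jolt is long enough, or an
-- in-range exceeding index is hit — and since getD only fabricates beyond jolt's length, i.e.
-- after the whole in-range part, the scan returns at the same index Python does).
def bAny (target jolt : List Int) : List Nat → Bool
  | [] => false
  | i :: r => if jolt.getD i 0 > target.getD i 0 then true else bAny target jolt r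

-- all(jolt[i] == target[i] for i in range(len(target))): reached only with no exceeding element,
-- which under Pre_ forces len(target) ≤ len(jolt), so every getD access is in range there.
def bAll (target jolt : List Int) : List Nat → Bool
  | [] => true
  | i :: r => if jolt.getD i 0 = target.getD i 0 then bAll target jolt r else false

def jcheck_alt (target : List Int) (jolt : List Int) : Int :=
  if bAny target jolt (List.range target.length) then 2
  else if bAll target jolt (List.range target.length) then 1 else 0

-- ===== PRECONDITION & SPEC =====
-- Pre_ excludes exactly the inputs where A (and B alike) raises IndexError: jolt shorter than
-- target with no compared pair where jolt's element exceeds target's.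
def Pre_jcheck (target : List Int) (jolt : List Int) : Prop :=
  target.length ≤ jolt.length ∨ ∃ p ∈ jolt.zip target, p.2 < p.1
instance (target : List Int) (jolt : List Int) : Decidable (Pre_jcheck target jolt) := by unfold Pre_jcheck; infer_instance
def pvWitness_jcheck : List Int × List Int := ([1, 2], [1, 2])

def Spec_jcheck (target : List Int) (jolt : List Int) (out : Int) : Prop := out = jcheck_alt target jolt
instance (target : List Int) (jolt : List Int) (out : Int) : Decidable (Spec_jcheck target jolt out) := by unfold Spec_jcheck; infer_instance

-- ===== CLAIM (what is proved, stated in full; the proofs are below) =====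
def Claim_equal_jcheck : Prop := ∀ (target : List Int) (jolt : List Int), Dom_jcheck target jolt → Pre_jcheck target jolt → Spec_jcheck target jolt (jcheck target jolt)

-- ===== LEMMAS AND PROOFS =====
lemma loop_eq (target jolt : List Int) (hpre : Pre_jcheck target jolt) :
    ∀ (m i : Nat) (jpass : Int), i + m = target.length →
      (∀ k, k < i → k < jolt.length ∧ ¬ target.getD k 0 < jolt.getD k 0) →
      (jpass = 0 ∨ jpass = 1) →
      jcheckLoop target jolt i jpass =
        (if bAny target jolt (List.range' i m) then 2
         else if jpass = 1 ∧ bAll target jolt (List.range' i m) = true then 1 else 0) := by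
  intro m
  induction m with
  | zero =>
    intro i jpass hm hinv hj
    rw [jcheckLoop]
    have h : ¬ i < target.length := by omega
    simp only [h, dif_neg, not_false_iff, List.range']
    rcases hj with hj | hj <;> simp [hj, bAny, bAll]
  | succ m ih =>
    intro i jpass hm hinv hj
    have h : i < target.length := by omega
    rw [jcheckLoop]
    simp only [h, dif_pos]
    rcases hg : jolt[i]? with _ | j
    · -- A would raise here: impossible under Pre_ given no earlier exceeding index
      exfalso
      have hlen : jolt.length ≤ i := by
        by_contra hlt
        exact absurd hg (by simp [List.getElem?_eq_getElem (by omega : i < jolt.length)])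
      rcases hpre with hp | ⟨⟨a, b⟩, hmem, hlt⟩
      · omega
      · rcases List.mem_iff_getElem.mp hmem with ⟨k, hk, hkeq⟩
        have hkj : k < jolt.length := by
          have := hk; rw [List.length_zip] at this; omega
        have hkt : k < target.length := by
          have := hk; rw [List.length_zip] at this; omega
        have hke : (jolt.zip target)[k] = (jolt[k], target[k]) := List.getElem_zip ..
        rw [hke] at hkeq
        have hki : k < i := by omega
        rcases hinv k hki with ⟨_, hnlt⟩
        rw [List.getD_eq_getElem _ _ hkt, List.getD_eq_getElem _ _ hkj] at hnlt
        have : b = target[k] := congrArg Prod.snd hkeq.symm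
        have ha : a = jolt[k] := congrArg Prod.fst hkeq.symm
        simp at hkeq
        omega
    · have hji : i < jolt.length := by
        by_contra hlt
        exact absurd hg (by simp [List.getElem?_eq_none (by omega : jolt.length ≤ i)])
      have hjv : j = jolt[i] := by
        rw [List.getElem?_eq_getElem hji] at hg
        exact (Option.some_inj.mp hg).symm
      have hgd_j : jolt[i]?.getD 0 = j := by rw [hg]; rfl
      have hgd_t : target[i]?.getD 0 = target[i] := by rw [List.getElem?_eq_getElem h]; rfl
      have hr : List.range' i (m + 1) = i :: List.range' (i + 1) m := List.range'_succ ..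
      show (if j > target[i] then 2
          else if j ≠ target[i] then jcheckLoop target jolt (i + 1) 0
          else jcheckLoop target jolt (i + 1) jpass) = _
      by_cases hgt : j > target[i]
      · simp [hr, bAny, hgd_j, hgd_t, hgt]
      · have hinv' : ∀ k, k < i + 1 → k < jolt.length ∧ ¬ target.getD k 0 < jolt.getD k 0 := by
          intro k hk
          rcases Nat.lt_or_ge k i with hk' | hk'
          · exact hinv k hk'
          · have : k = i := by omega
            subst this
            exact ⟨hji, by
              rw [List.getD_eq_getElem _ _ h, List.getD_eq_getElem _ _ hji, ← hjv]; omega⟩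
        have hanyr : bAny target jolt (List.range' i (m + 1))
            = bAny target jolt (List.range' (i + 1) m) := by
          simp [hr, bAny, hgd_j, hgd_t, hgt]
        by_cases heq : j ≠ target[i]
        · have hallf : bAll target jolt (List.range' i (m + 1)) = false := by
            simp [hr, bAll, hgd_j, hgd_t]
            intro hc
            exact absurd hc heq
          rw [if_neg hgt, if_pos heq,
            ih (i + 1) 0 (by omega) hinv' (Or.inl rfl), hanyr, hallf]
          simp
        · rw [not_ne_iff] at heq
          have hallr : bAll target jolt (List.range' i (m + 1))
              = bAll target jolt (List.range' (i + 1) m) := by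
            simp [hr, bAll, hgd_j, hgd_t, heq]
          rw [if_neg hgt, if_neg (by simpa using heq),
            ih (i + 1) jpass (by omega) hinv' hj, hanyr, hallr]

lemma ports_agree (target jolt : List Int) (hpre : Pre_jcheck target jolt) :
    jcheck target jolt = jcheck_alt target jolt := by
  unfold jcheck jcheck_alt
  rw [loop_eq target jolt hpre target.length 0 1 (by omega) (by omega) (Or.inr rfl),
    ← List.range_eq_range']
  simp

-- ===== VERDICT (by name: the statement is the Claim_ definition above) =====
theorem jcheck_spec : Claim_equal_jcheck := by
  intro target jolt _ hpre
  exact ports_agree target jolt hpre
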